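-- pv_equiv track=rewrite | github.com/bearylogical/searchgov | src/orgs/orgs.py | _extract_department_layers
-- ===== SOURCE A (Python) =====
-- from typing import Dict, List, Optional, Set, NamedTuple, Any
--
-- def _extract_department_layers(
--     path_parts: List[str]
-- ) -> List[str]:
--     dept_layers = []
--     in_departments = False
--
--     for part in path_parts[1:]:
--         if part.lower() == "departments":
--             in_departments = True
--         elif in_departments:
--             dept_layers.append(part)
--             in_departments = False
--
--     return dept_layers
-- ===== SOURCE B (Python) =====
-- def _extract_department_layers(path_parts):
--     return [cur for prev, cur in zip(path_parts[1:], path_parts[2:])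
--             if prev.lower() == "departments" and cur.lower() != "departments"]
-- ===== Notes on version B (the rewrite author's own statement) =====
-- stated objective: idiomatic
-- what changed: Replaced the stateful in_departments flag loop with a stateless comprehension over consecutive pairs zip(path_parts[1:], path_parts[2:]), collecting cur whenever prev is the 'departments' marker and cur is not.
import Mathlib
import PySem

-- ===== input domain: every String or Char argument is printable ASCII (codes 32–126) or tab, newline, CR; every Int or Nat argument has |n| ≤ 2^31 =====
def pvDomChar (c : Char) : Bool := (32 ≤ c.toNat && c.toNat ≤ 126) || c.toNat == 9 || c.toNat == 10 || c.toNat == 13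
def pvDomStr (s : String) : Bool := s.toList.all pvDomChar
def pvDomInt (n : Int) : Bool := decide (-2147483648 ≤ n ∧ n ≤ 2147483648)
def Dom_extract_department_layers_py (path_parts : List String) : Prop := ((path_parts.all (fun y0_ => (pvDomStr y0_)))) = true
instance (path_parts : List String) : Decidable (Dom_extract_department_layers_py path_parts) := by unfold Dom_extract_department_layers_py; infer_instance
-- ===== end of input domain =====

-- B replaces A's stateful in_departments flag with a stateless scan over consecutive pairs (idiomatic; same cost).

-- ===== PORT A =====
-- literal port of A: fold over path_parts[1:] carrying (dept_layers, in_departments)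
def extract_department_layers_py (path_parts : List String) : List String :=
  ((path_parts.drop 1).foldl
    (fun (st : List String × Bool) part =>
      if PySem.Str.lower part = "departments" then (st.1, true)
      else if st.2 then (st.1 ++ [part], false)
      else st)
    ([], false)).1

-- ===== PORT B =====
-- literal port of B: comprehension over zip(path_parts[1:], path_parts[2:])
def extract_department_layers_py_alt (path_parts : List String) : List String :=
  ((path_parts.drop 1).zip (path_parts.drop 2)).filterMap
    (fun pc =>
      if PySem.Str.lower pc.1 = "departments" ∧ ¬ PySem.Str.lower pc.2 = "departments"
      then some pc.2 else none)

-- ===== PRECONDITION & SPEC =====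
def Spec_extract_department_layers_py (path_parts : List String) (out : List String) : Prop := out = extract_department_layers_py_alt path_parts
instance (path_parts : List String) (out : List String) : Decidable (Spec_extract_department_layers_py path_parts out) := by unfold Spec_extract_department_layers_py; infer_instance

-- ===== CLAIM (what is proved, stated in full; the proofs are below) =====
def Claim_equal_extract_department_layers_py : Prop := ∀ (path_parts : List String), Dom_extract_department_layers_py path_parts → Spec_extract_department_layers_py path_parts (extract_department_layers_py path_parts)

-- ===== LEMMAS AND PROOFS =====

-- A's loop, as a structural recursion on the remaining list with the flag as parameter
def stepA : Bool → List String → List String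
  | _, [] => []
  | b, x :: xs =>
    if PySem.Str.lower x = "departments" then stepA true xs
    else if b then x :: stepA false xs else stepA false xs

lemma foldl_eq_stepA : ∀ (l : List String) (acc : List String) (b : Bool),
    (l.foldl
      (fun (st : List String × Bool) part =>
        if PySem.Str.lower part = "departments" then (st.1, true)
        else if st.2 then (st.1 ++ [part], false)
        else st)
      (acc, b)).1 = acc ++ stepA b l := by
  intro l
  induction l with
  | nil => intro acc b; simp [stepA]
  | cons x xs ih =>
    intro acc b
    simp only [List.foldl_cons, stepA]
    split_ifs <;> simp_all

-- B's pair scan, as a structural recursion on the list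
def pairsB : List String → List String
  | x :: y :: r =>
    (if PySem.Str.lower x = "departments" ∧ ¬ PySem.Str.lower y = "departments"
     then [y] else []) ++ pairsB (y :: r)
  | _ => []

lemma pairsB_eq_filterMap : ∀ (l : List String),
    (l.zip l.tail).filterMap
      (fun pc =>
        if PySem.Str.lower pc.1 = "departments" ∧ ¬ PySem.Str.lower pc.2 = "departments"
        then some pc.2 else none) = pairsB l := by
  intro l
  match l with
  | [] => simp [pairsB]
  | [x] => simp [pairsB]
  | x :: y :: r =>
    have ih := pairsB_eq_filterMap (y :: r)
    simp only [List.tail_cons, List.zip_cons_cons, List.filterMap_cons, pairsB]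
    split_ifs with h <;> simp_all

lemma stepA_eq_pairsB : ∀ (l : List String) (b : Bool),
    stepA b l =
      (match l with
        | [] => []
        | x :: _ => if b ∧ ¬ PySem.Str.lower x = "departments" then [x] else []) ++ pairsB l := by
  intro l
  induction l with
  | nil => intro b; simp [stepA, pairsB]
  | cons x xs ih =>
    intro b
    match xs with
    | [] =>
      rw [stepA]
      split_ifs <;> simp_all [stepA, pairsB]
    | y :: r =>
      rw [stepA, ih true, ih false]
      show _ = _ ++ pairsB (x :: y :: r)
      rw [pairsB]
      split_ifs <;> simp_all

-- ===== VERDICT (by name: the statement is the Claim_ definition above) =====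
theorem extract_department_layers_py_spec : Claim_equal_extract_department_layers_py := by
  intro pp _
  show extract_department_layers_py pp = extract_department_layers_py_alt pp
  unfold extract_department_layers_py extract_department_layers_py_alt
  rw [foldl_eq_stepA, stepA_eq_pairsB]
  have h2 : pp.drop 2 = (pp.drop 1).tail := by
    rw [← List.drop_one, List.drop_drop]
  rw [h2, pairsB_eq_filterMap]
  cases pp.drop 1 <;> simp
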